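-- pv_equiv track=rewrite | github.com/CYHSM/modalities | src/modalities/post_inference/experiments/capture_correct_vs_incorrect.py | clean_number
-- ===== SOURCE A (Python) =====
-- def clean_number(text):
--     text = text.strip()
--     for char in [',', '$', '%', 'g', '.']:
--         text = text.replace(char, '')
--     try:
--         return str(int(text))
--     except:
--         return text
-- ===== SOURCE B (Python) =====
-- def clean_number(text):
--     text = text.strip()
--     text = ''.join(c for c in text if c not in {',', '$', '%', 'g', '.'})
--     try:
--         return str(int(text))
--     except:
--         return text
-- ===== Notes on version B (the rewrite author's own statement) =====
-- stated objective: idiomatic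
-- what changed: The five sequential full-string replace() passes are replaced by one filtering pass over the characters testing membership in a removal set.
import Mathlib
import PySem

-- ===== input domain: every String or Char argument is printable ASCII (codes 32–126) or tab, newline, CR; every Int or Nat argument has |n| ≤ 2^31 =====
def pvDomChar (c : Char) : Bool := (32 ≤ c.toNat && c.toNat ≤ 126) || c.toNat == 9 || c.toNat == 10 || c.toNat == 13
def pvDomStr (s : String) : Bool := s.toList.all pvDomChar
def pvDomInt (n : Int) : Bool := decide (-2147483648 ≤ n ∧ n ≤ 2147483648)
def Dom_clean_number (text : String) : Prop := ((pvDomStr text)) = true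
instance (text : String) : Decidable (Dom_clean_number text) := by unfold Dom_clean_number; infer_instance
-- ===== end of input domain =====

-- B replaces A's five sequential replace() passes by one filtering pass over the characters (idiomatic).

-- ===== PORT A =====
def clean_number (text : String) : String :=
  let t0 := PySem.Str.strip text
  let t := [",", "$", "%", "g", "."].foldl (fun s ch => PySem.Str.replace s ch "") t0
  match PySem.Int.ofStr? t with
  | some n => PySem.Int.toStr n
  | none => t

-- ===== PORT B =====
def clean_number_alt (text : String) : String :=
  let t0 := PySem.Str.strip text
  let t := String.ofList (t0.toList.filter (fun c => !([',', '$', '%', 'g', '.'].contains c)))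
  match PySem.Int.ofStr? t with
  | some n => PySem.Int.toStr n
  | none => t

-- ===== PRECONDITION & SPEC =====
def Spec_clean_number (text : String) (out : String) : Prop := out = clean_number_alt text
instance (text : String) (out : String) : Decidable (Spec_clean_number text out) := by unfold Spec_clean_number; infer_instance

-- ===== CLAIM (what is proved, stated in full; the proofs are below) =====
def Claim_equal_clean_number : Prop := ∀ (text : String), Dom_clean_number text → Spec_clean_number text (clean_number text)

-- ===== LEMMAS AND PROOFS =====

-- replacing a single character by the empty string is filtering it out
theorem replace_go_single (c : Char) : ∀ (fuel : Nat) (l acc : List Char), l.length ≤ fuel →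
    PySem.Chars.replace.go [c] [] fuel l acc = acc.reverse ++ l.filter (fun x => !(x == c)) := by
  intro fuel
  induction fuel with
  | zero =>
    intro l acc h
    have : l = [] := List.eq_nil_of_length_eq_zero (Nat.le_zero.mp h)
    subst this
    simp [PySem.Chars.replace.go]
  | succ n ih =>
    intro l acc h
    cases l with
    | nil => simp [PySem.Chars.replace.go]
    | cons x t =>
      rw [PySem.Chars.replace.go]
      by_cases hx : x = c
      · subst hx
        have hpre : List.isPrefixOf [x] (x :: t) = true := by simp [List.isPrefixOf]
        simp only [hpre, if_true]
        rw [show List.drop [x].length (x :: t) = t from rfl,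
            show ([] : List Char).reverse ++ acc = acc from rfl,
            ih t acc (by simpa using Nat.le_of_succ_le_succ h)]
        simp
      · have hpre : List.isPrefixOf [c] (x :: t) = false := by
          simp [List.isPrefixOf]; exact fun h' => hx h'.symm
        simp only [hpre, Bool.false_eq_true, if_false]
        rw [ih t (x :: acc) (by simpa using Nat.le_of_succ_le_succ h)]
        simp [hx]

theorem replace_single (c : Char) (s : List Char) :
    PySem.Chars.replace s [c] [] = s.filter (fun x => !(x == c)) := by
  rw [PySem.Chars.replace]
  simp only [List.isEmpty_cons, Bool.false_eq_true, if_false]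
  simpa using replace_go_single c s.length s []

-- ===== VERDICT (by name: the statement is the Claim_ definition above) =====
theorem clean_number_spec : Claim_equal_clean_number := by
  intro text _
  unfold Spec_clean_number clean_number clean_number_alt
  have key :
      [",", "$", "%", "g", "."].foldl (fun s ch => PySem.Str.replace s ch "") (PySem.Str.strip text)
        = String.ofList ((PySem.Str.strip text).toList.filter
            (fun c => !([',', '$', '%', 'g', '.'].contains c))) := by
    apply String.toList_injective
    simp only [List.foldl, PySem.Str.replace]
    simp only [String.toList_ofList]
    simp only [show (",").toList = [','] from rfl, show ("$").toList = ['$'] from rfl,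
      show ("%").toList = ['%'] from rfl, show ("g").toList = ['g'] from rfl,
      show (".").toList = ['.'] from rfl, show ("").toList = ([] : List Char) from rfl]
    simp only [replace_single]
    rw [List.filter_filter, List.filter_filter, List.filter_filter, List.filter_filter]
    apply List.filter_congr
    intro c _
    rcases eq_or_ne c ',' with h | h <;> rcases eq_or_ne c '$' with h2 | h2 <;>
      rcases eq_or_ne c '%' with h3 | h3 <;> rcases eq_or_ne c 'g' with h4 | h4 <;>
      rcases eq_or_ne c '.' with h5 | h5 <;>
      simp_all
  simp only [key]
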